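-- pv_equiv track=rewrite | github.com/mtchibozo/Telecom | Data Science/Scholar-Affiliation-Recognition-Project/paf-affiliations-data_mining/AffiliationTracker.py | get_author_order
-- ===== SOURCE A (Python) =====
-- def find_position_in_string(string, author):
--     return len(string.split(author)[0].split(" "))
--
-- def get_author_order(LinesList, authorList):
--     order_MAP={}
--     for author in authorList:
--         for i in range(len(LinesList)):
--             line = LinesList[i]
--             if author in line:
--                 order_MAP[author]=find_position_in_string(line, author)+100*i
--                 break
--     return order_MAP
-- ===== SOURCE B (Python) =====
-- def find_position_in_string(string, author):
--     return len(string.split(author)[0].split(" "))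
--
-- def get_author_order(LinesList, authorList):
--     # line-major single pass: keep an ordered list of authors still unfound,
--     # then emit the results in authorList order.
--     remaining = list(dict.fromkeys(authorList))
--     found = {}
--     for i, line in enumerate(LinesList):
--         if not remaining:
--             break
--         still = []
--         for a in remaining:
--             if a in line:
--                 found[a] = find_position_in_string(line, a) + 100 * i
--             else:
--                 still.append(a)
--         remaining = still
--     return {a: found[a] for a in authorList if a in found}
-- ===== Notes on version B (the rewrite author's own statement) =====
-- stated objective: alternative
-- what changed: B inverts the loop nesting: one line-major pass keeping an ordered list of still-unfound authors (with an early break once empty), then emits the results in authorList order, instead of A's author-major scan restarting over all lines for each author.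
import Mathlib
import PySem

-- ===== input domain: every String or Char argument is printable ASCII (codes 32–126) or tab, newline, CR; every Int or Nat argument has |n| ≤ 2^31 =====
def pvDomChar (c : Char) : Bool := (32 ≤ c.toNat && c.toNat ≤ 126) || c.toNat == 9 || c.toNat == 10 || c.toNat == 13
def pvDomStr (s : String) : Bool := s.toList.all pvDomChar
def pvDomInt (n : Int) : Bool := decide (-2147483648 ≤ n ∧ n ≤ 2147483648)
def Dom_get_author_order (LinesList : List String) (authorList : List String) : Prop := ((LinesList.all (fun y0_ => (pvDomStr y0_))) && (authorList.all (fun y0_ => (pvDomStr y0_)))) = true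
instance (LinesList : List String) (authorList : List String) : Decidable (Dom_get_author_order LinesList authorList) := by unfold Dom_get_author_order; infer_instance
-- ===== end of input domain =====

-- B inverts A's loop nesting (one line-major pass over the lines with an ordered
-- still-unfound author list, results emitted in authorList order); same results, same cost.

-- ===== PORT A =====
-- find_position_in_string: len(string.split(author)[0].split(" ")).
-- author = "" makes str.split raise ValueError; that case is unreachable under Pre_ (the none branch).
def fpisA (string author : String) : Int :=
  match PySem.Str.split? string author with
  | none => 0
  | some parts => (((PySem.Str.split? (parts.headD "") " ").getD []).length : Int)

-- inner 'for i in range(len(LinesList)): … break' of A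
def innerA (LinesList : List String) (author : String) :
    List Int → PySem.Dict String Int → PySem.Dict String Int
  | [], d => d
  | i :: rest, d =>
      let line := PySem.List.pyGetD LinesList i ""
      if PySem.Str.isIn author line then
        d.insert author (fpisA line author + 100 * i)
      else innerA LinesList author rest d

def get_author_order (LinesList : List String) (authorList : List String) : List (String × Int) :=
  (authorList.foldl
    (fun d author => innerA LinesList author (PySem.List.pyRange 0 (LinesList.length : Int) 1) d)
    PySem.Dict.empty).items

-- ===== PORT B =====
def fpisB (string author : String) : Int :=
  match PySem.Str.split? string author with
  | none => 0
  | some parts => (((PySem.Str.split? (parts.headD "") " ").getD []).length : Int)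

-- inner 'for a in remaining: …' of B: returns (still, found)
def scanLineB (line : String) (i : Int) :
    List String → PySem.Dict String Int → List String × PySem.Dict String Int
  | [], found => ([], found)
  | a :: rest, found =>
      if PySem.Str.isIn a line then
        scanLineB line i rest (found.insert a (fpisB line a + 100 * i))
      else
        let r := scanLineB line i rest found
        (a :: r.1, r.2)

-- outer 'for i, line in enumerate(LinesList): if not remaining: break …' of B
def linesLoopB : List (Int × String) → List String → PySem.Dict String Int → PySem.Dict String Int
  | _, [], found => found
  | [], _ :: _, found => found
  | (i, line) :: rest, remaining, found =>
      let r := scanLineB line i remaining found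
      linesLoopB rest r.1 r.2

def get_author_order_alt (LinesList : List String) (authorList : List String) : List (String × Int) :=
  let found := linesLoopB (PySem.List.enumerate LinesList 0) (PySem.List.dedup authorList) PySem.Dict.empty
  (authorList.foldl
    (fun d a => if found.contains a then d.insert a (found.getD a 0) else d)
    PySem.Dict.empty).items

-- ===== PRECONDITION & SPEC =====
-- Pre_ excludes exactly the inputs where A raises: an empty author string with a non-empty
-- LinesList makes ''.split('') raise ValueError('empty separator') (B raises there too).
def Pre_get_author_order (LinesList : List String) (authorList : List String) : Prop :=
  "" ∈ authorList → LinesList = []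

instance (LinesList : List String) (authorList : List String) : Decidable (Pre_get_author_order LinesList authorList) := by
  unfold Pre_get_author_order; infer_instance

def pvWitness_get_author_order : List String × List String := (["a b cd", "x y"], ["cd", "y", "zz"])

def Spec_get_author_order (LinesList : List String) (authorList : List String) (out : List (String × Int)) : Prop :=
  out = get_author_order_alt LinesList authorList

instance (LinesList : List String) (authorList : List String) (out : List (String × Int)) : Decidable (Spec_get_author_order LinesList authorList out) := by
  unfold Spec_get_author_order; infer_instance

-- ===== CLAIM (what is proved, stated in full; the proofs are below) =====
def Claim_equal_get_author_order : Prop :=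
  ∀ (LinesList : List String) (authorList : List String),
    Dom_get_author_order LinesList authorList →
    Pre_get_author_order LinesList authorList →
    Spec_get_author_order LinesList authorList (get_author_order LinesList authorList)

-- ===== LEMMAS AND PROOFS =====

-- value A stores for author a at the first line (from index i on) that contains a
def firstHit (a : String) : List String → Int → Option Int
  | [], _ => none
  | l :: rest, i => if PySem.Str.isIn a l then some (fpisA l a + 100 * i) else firstHit a rest (i + 1)

theorem fpisB_eq_fpisA : fpisB = fpisA := rfl

theorem innerA_eq_firstHit (LinesList : List String) (author : String) (n : Nat) :
    ∀ (k : Nat) (d : PySem.Dict String Int), k ≤ LinesList.length → LinesList.length - k = n →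
    innerA LinesList author (PySem.List.pyRange (k : Int) (LinesList.length : Int) 1) d =
      (match firstHit author (LinesList.drop k) (k : Int) with
       | some v => d.insert author v
       | none => d) := by
  induction n with
  | zero =>
      intro k d hk hn
      have hk' : k = LinesList.length := by omega
      subst hk'
      rw [PySem.List.pyRange_one_eq_nil (le_refl _)]
      simp [innerA, firstHit, List.drop_length]
  | succ n ih =>
      intro k d hk hn
      have hklt : k < LinesList.length := by omega
      rw [PySem.List.pyRange_one_cons (by exact_mod_cast hklt)]
      have hget : PySem.List.pyGetD LinesList (k : Int) "" = LinesList[k] := by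
        rw [PySem.List.pyGetD_natCast]
        exact List.getD_eq_getElem _ _ hklt
      have hdrop : LinesList.drop k = LinesList[k] :: LinesList.drop (k + 1) :=
        List.drop_eq_getElem_cons hklt
      show (if PySem.Str.isIn author (PySem.List.pyGetD LinesList (k : Int) "") then _ else _) = _
      rw [hget, hdrop]
      simp only [firstHit]
      by_cases h : PySem.Str.isIn author LinesList[k] = true
      · rw [if_pos h, if_pos h]
      · rw [if_neg h, if_neg h,
          show ((k : Int) + 1) = ((k + 1 : Nat) : Int) by push_cast; ring]
        exact ih (k + 1) d (by omega) (by omega)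

theorem scanLineB_fst (line : String) (i : Int) :
    ∀ (R : List String) (found : PySem.Dict String Int),
      (scanLineB line i R found).1 = R.filter (fun a => !(PySem.Str.isIn a line)) := by
  intro R
  induction R with
  | nil => intro found; simp [scanLineB]
  | cons a rest ih =>
      intro found
      by_cases h : PySem.Chars.isIn a.toList line.toList = true
      · simp [scanLineB, h, ih]
      · simp [scanLineB, h, ih]

theorem scanLineB_get? (line : String) (i : Int) :
    ∀ (R : List String) (found : PySem.Dict String Int) (x : String),
      (scanLineB line i R found).2.get? x =
        (if x ∈ R ∧ PySem.Str.isIn x line = true then some (fpisA line x + 100 * i)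
         else found.get? x) := by
  intro R
  induction R with
  | nil => intro found x; simp [scanLineB]
  | cons a rest ih =>
      intro found x
      by_cases h : PySem.Chars.isIn a.toList line.toList = true
      · simp only [scanLineB, PySem.Str.isIn_eq, h, if_true]
        rw [ih, fpisB_eq_fpisA]
        by_cases hx : x ∈ rest ∧ PySem.Str.isIn x line = true
        · rw [if_pos hx, if_pos ⟨List.mem_cons_of_mem _ hx.1, hx.2⟩]
        · rw [if_neg hx]
          by_cases hxa : x = a
          · subst hxa
            rw [PySem.Dict.get?_insert_self,
              if_pos ⟨List.mem_cons_self, by simpa using h⟩]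
          · rw [PySem.Dict.get?_insert, if_neg hxa]
            rw [if_neg (by
              rintro ⟨hm, hin⟩
              rcases List.mem_cons.mp hm with h1 | h1
              · exact hxa h1
              · exact hx ⟨h1, hin⟩)]
      · simp only [scanLineB, PySem.Str.isIn_eq, h, Bool.false_eq_true, if_false]
        rw [ih]
        congr 1
        simp only [List.mem_cons, PySem.Str.isIn_eq, eq_iff_iff]
        constructor
        · rintro ⟨h1, h2⟩; exact ⟨Or.inr h1, h2⟩
        · rintro ⟨h1, h2⟩
          rcases h1 with h1 | h1
          · subst h1; exact absurd h2 h
          · exact ⟨h1, h2⟩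

theorem linesLoopB_get? :
    ∀ (LS : List String) (k : Int) (R : List String) (found : PySem.Dict String Int) (x : String),
      (linesLoopB (PySem.List.enumerate LS k) R found).get? x =
        (if x ∈ R then
           (match firstHit x LS k with
            | some v => some v
            | none => found.get? x)
         else found.get? x) := by
  intro LS
  induction LS with
  | nil =>
      intro k R found x
      cases R with
      | nil => simp [PySem.List.enumerate_nil, linesLoopB]
      | cons a rest =>
          simp only [PySem.List.enumerate_nil, linesLoopB, firstHit]
          split <;> rfl
  | cons l rest ih =>
      intro k R found x
      rw [PySem.List.enumerate_cons]
      cases R with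
      | nil => simp [linesLoopB]
      | cons a R' =>
          show (linesLoopB (PySem.List.enumerate rest (k + 1))
                  (scanLineB l k (a :: R') found).1 (scanLineB l k (a :: R') found).2).get? x = _
          rw [ih, scanLineB_fst, scanLineB_get?]
          simp only [firstHit]
          by_cases hxR : x ∈ a :: R'
          · by_cases hin : PySem.Chars.isIn x.toList l.toList = true
            · have hxf : x ∉ (a :: R').filter (fun a => !(PySem.Str.isIn a l)) := by
                simp [List.mem_filter, hin]
              rw [if_neg hxf, if_pos ⟨hxR, by simpa using hin⟩, if_pos hxR,
                if_pos (by simpa using hin)]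
            · have hfalse : PySem.Chars.isIn x.toList l.toList = false :=
                Bool.eq_false_iff.mpr hin
              have hxf : x ∈ (a :: R').filter (fun a => !(PySem.Str.isIn a l)) :=
                List.mem_filter.mpr ⟨hxR, by simp [hfalse]⟩
              rw [if_pos hxf, if_pos hxR, if_neg (by simp [hfalse])]
              rw [if_neg (fun hcon => hin (by simpa using hcon))]
          · have hxf : x ∉ (a :: R').filter (fun a => !(PySem.Str.isIn a l)) := by
              intro h; exact hxR (List.mem_of_mem_filter h)
            rw [if_neg hxf, if_neg (by rintro ⟨h1, _⟩; exact hxR h1), if_neg hxR]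

theorem found_get? (LinesList : List String) (authorList : List String) (x : String) :
    (linesLoopB (PySem.List.enumerate LinesList 0) (PySem.List.dedup authorList) PySem.Dict.empty).get? x =
      (if x ∈ authorList then firstHit x LinesList 0 else none) := by
  rw [linesLoopB_get?]
  simp only [PySem.List.mem_dedup, PySem.Dict.get?_empty]
  by_cases hx : x ∈ authorList
  · rw [if_pos hx, if_pos hx]
    cases firstHit x LinesList 0 <;> rfl
  · rw [if_neg hx, if_neg hx]

-- ===== VERDICT (by name: the statement is the Claim_ definition above) =====
theorem get_author_order_spec : Claim_equal_get_author_order := by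
  intro LinesList authorList _ _
  unfold Spec_get_author_order get_author_order get_author_order_alt
  congr 1
  apply PySem.List.foldl_congr_mem'
  intro a ha d
  have hA := innerA_eq_firstHit LinesList a (LinesList.length - 0) 0 d (by omega) rfl
  simp only [Nat.cast_zero, List.drop_zero] at hA
  rw [hA]
  have hc : (linesLoopB (PySem.List.enumerate LinesList 0) (PySem.List.dedup authorList)
      PySem.Dict.empty).contains a =
      (firstHit a LinesList 0).isSome := by
    rw [PySem.Dict.contains_eq_isSome_get?, found_get?, if_pos ha]
  have hd : (linesLoopB (PySem.List.enumerate LinesList 0) (PySem.List.dedup authorList)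
      PySem.Dict.empty).getD a 0 = (firstHit a LinesList 0).getD 0 := by
    rw [PySem.Dict.getD_eq_get?_getD, found_get?, if_pos ha]
  rw [hc, hd]
  cases h : firstHit a LinesList 0 <;> simp
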